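-- pv_equiv track=rewrite | github.com/kushXpai/daa | bfs.py | bfs_for_all_components
-- ===== SOURCE A (Python) =====
-- from collections import deque
--
-- def bfs(graph, start_node, visited, directed):
--     queue = deque([start_node])
--     visited.add(start_node)
--     bfs_order = []
--
--     while queue:
--         node = queue.popleft()
--         bfs_order.append(node)
--
--         if directed:
--             neighbors = graph.get(node, [])
--         else:
--             neighbors = graph[node]
--
--         for neighbor in neighbors:
--             if neighbor not in visited:
--                 visited.add(neighbor)
--                 queue.append(neighbor)
--
--     return bfs_order
--
-- def bfs_for_all_components(graph, directed):
--     visited = set()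
--     components = []
--
--     for node in graph:
--         if node not in visited:
--             component = bfs(graph, node, visited, directed)
--             components.append(component)
--
--     return components
-- ===== SOURCE B (Python) =====
-- def _neighbors(graph, u, directed):
--     return graph.get(u, []) if directed else graph[u]
--
-- def _bfs_component(graph, start, visited, directed):
--     visited.add(start)
--     order = []
--     frontier = [start]
--     while frontier:
--         order += frontier
--         candidates = [w for u in frontier for w in _neighbors(graph, u, directed)]
--         frontier = []
--         for w in candidates:
--             if w not in visited:
--                 visited.add(w)
--                 frontier.append(w)
--     return order
--
-- def bfs_for_all_components(graph, directed):
--     visited = set()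
--     return [_bfs_component(graph, node, visited, directed)
--             for node in graph if node not in visited]
-- ===== Notes on version B (the rewrite author's own statement) =====
-- stated objective: alternative
-- what changed: The per-component deque popleft loop is replaced by a level-synchronous scheme: each level flattens all frontier nodes' neighbor lists into one candidate list and then filters it against the shared visited set to form the next frontier, and the outer component loop becomes a list comprehension over the keys; the Lean B port is recursive where A's is a queue fold.
-- outside the precondition, e.g. on bfs_for_all_components({1: [2]}, False): A raises KeyError, B raises KeyError
import Mathlib
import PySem

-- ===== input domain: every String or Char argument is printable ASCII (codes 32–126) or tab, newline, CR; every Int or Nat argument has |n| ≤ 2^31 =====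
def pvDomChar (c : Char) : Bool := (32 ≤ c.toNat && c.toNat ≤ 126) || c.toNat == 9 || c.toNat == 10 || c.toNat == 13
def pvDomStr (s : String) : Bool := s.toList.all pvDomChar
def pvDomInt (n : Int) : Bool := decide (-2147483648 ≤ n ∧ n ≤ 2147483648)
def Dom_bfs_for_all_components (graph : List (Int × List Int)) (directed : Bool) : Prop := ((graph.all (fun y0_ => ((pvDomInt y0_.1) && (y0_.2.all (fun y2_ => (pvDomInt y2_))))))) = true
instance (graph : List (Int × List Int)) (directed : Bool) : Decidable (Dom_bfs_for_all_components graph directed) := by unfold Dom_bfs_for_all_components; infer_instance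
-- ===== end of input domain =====

-- B replaces the deque-based popleft BFS by a level-synchronous traversal: per level it flattens all
-- frontier neighbors into one candidate list and filters it against visited (alternative decomposition, no speed claim).
-- Pre_ excludes exactly the inputs where Python A raises KeyError (undirected lookup of a neighbor that is not a key); B raises there too.


-- Termination infrastructure shared by both ports (cited in their decreasing_by):
-- every node ever enqueued lies in the fixed universe pvUniv, and each enqueue marks a fresh node visited.
def pvUniv (d : PySem.Dict Int (List Int)) : List Int :=
  PySem.Set.ofList (d.keys ++ d.values.flatten)

def pvUnvis (d : PySem.Dict Int (List Int)) (v : PySem.Set Int) : Nat :=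
  (pvUniv d).countP (fun x => !(PySem.Set.contains v x))

theorem pvUnvis_add_lt (d : PySem.Dict Int (List Int)) (v : PySem.Set Int) (w : Int)
    (hw : w ∈ pvUniv d) (hv : PySem.Set.contains v w = false) :
    pvUnvis d (PySem.Set.add v w) < pvUnvis d v := by
  obtain ⟨l1, l2, h⟩ := List.append_of_mem hw
  unfold pvUnvis
  rw [h]
  have hmono : ∀ (L : List Int), L.countP (fun x => !(PySem.Set.contains (PySem.Set.add v w) x))
      ≤ L.countP (fun x => !(PySem.Set.contains v x)) := by
    intro L
    apply List.countP_mono_left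
    intro x _ hx
    simp only [Bool.not_eq_eq_eq_not, Bool.not_true, PySem.Set.contains, List.contains_eq_mem,
      decide_eq_false_iff_not] at hx ⊢
    intro hmem
    exact hx ((PySem.Set.mem_add v w x).mpr (Or.inl hmem))
  have hw1 : (!(PySem.Set.contains (PySem.Set.add v w) w)) = false := by
    simp only [Bool.not_eq_false', PySem.Set.contains, List.contains_eq_mem, decide_eq_true_iff]
    exact (PySem.Set.mem_add v w w).mpr (Or.inr rfl)
  have hw2 : (!(PySem.Set.contains v w)) = true := by rw [hv]; rfl
  have h1 := hmono l1
  have h2 := hmono l2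
  simp only [List.countP_append, List.countP_cons, hw1, hw2, Bool.false_eq_true, if_false,
    if_true]
  omega

theorem pvPush_mu (d : PySem.Dict Int (List Int)) (nbrs : List Int)
    (h : ∀ w ∈ nbrs, w ∈ pvUniv d) :
    ∀ (q : List Int) (v : PySem.Set Int),
      2 * pvUnvis d (nbrs.foldl (fun a w => if PySem.Set.contains a.2 w then a
          else (a.1 ++ [w], PySem.Set.add a.2 w)) (q, v)).2
        + (nbrs.foldl (fun a w => if PySem.Set.contains a.2 w then a
          else (a.1 ++ [w], PySem.Set.add a.2 w)) (q, v)).1.length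
      ≤ 2 * pvUnvis d v + q.length := by
  induction nbrs with
  | nil => intro q v; simp
  | cons w t ih =>
    intro q v
    have hw : w ∈ pvUniv d := h w (by simp)
    have ht : ∀ x ∈ t, x ∈ pvUniv d := fun x hx => h x (by simp [hx])
    simp only [List.foldl_cons]
    by_cases hc : PySem.Set.contains v w
    · simp only [hc, if_true]
      exact ih ht q v
    · simp only [hc, Bool.false_eq_true, if_false]
      have hlt := pvUnvis_add_lt d v w hw (by simpa using hc)
      have := ih ht (q ++ [w]) (PySem.Set.add v w)
      simp only [List.length_append, List.length_cons, List.length_nil] at this ⊢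
      omega

theorem pvNbrsIf_univ (d : PySem.Dict Int (List Int)) (directed : Bool) (u : Int) :
    ∀ w ∈ (if directed then d.getD u [] else (d.get? u).getD []), w ∈ pvUniv d := by
  intro w hw
  have hw' : w ∈ (d.get? u).getD [] := by
    rcases directed with _ | _
    · simpa using hw
    · simpa [PySem.Dict.getD_eq_get?_getD] using hw
  cases hg : d.get? u with
  | none => rw [hg] at hw'; simp at hw'
  | some l =>
    rw [hg] at hw'
    simp only [Option.getD_some] at hw'
    have : l ∈ d.values := by
      have := PySem.Dict.mem_items_of_get?_eq_some d hg
      simp only [PySem.Dict.values]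
      exact List.mem_map.mpr ⟨(u, l), this, rfl⟩
    have : w ∈ d.values.flatten := List.mem_flatten.mpr ⟨l, this, hw'⟩
    exact (PySem.Set.mem_ofList _ _).mpr (List.mem_append.mpr (Or.inr this))

-- ===== PORT A =====
-- bfs(graph, start, visited, directed): FIFO queue, popleft loop; enqueue marks visited.
def pvBfsA (d : PySem.Dict Int (List Int)) (directed : Bool) :
    List Int → PySem.Set Int → List Int × PySem.Set Int
  | [], visited => ([], visited)
  | node :: rest, visited =>
    -- graph[node] raises KeyError when get? = none (excluded by Pre_); the [] default is junk outside Pre_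
    let nbrs := if directed then d.getD node [] else (d.get? node).getD []
    let p := nbrs.foldl (fun a w => if PySem.Set.contains a.2 w then a
      else (a.1 ++ [w], PySem.Set.add a.2 w)) (rest, visited)
    let r := pvBfsA d directed p.1 p.2
    (node :: r.1, r.2)
termination_by q v => 2 * pvUnvis d v + q.length
decreasing_by
  have := pvPush_mu d _ (pvNbrsIf_univ d directed node) rest visited
  simp only [List.length_cons, dite_eq_ite]
  omega

def bfs_for_all_components (graph : List (Int × List Int)) (directed : Bool) : List (List Int) :=
  let d := PySem.Dict.ofList graph
  (d.keys.foldl (fun (acc : List (List Int) × PySem.Set Int) node =>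
      if PySem.Set.contains acc.2 node then acc
      else
        let r := pvBfsA d directed [node] (PySem.Set.add acc.2 node)
        (acc.1 ++ [r.1], r.2)) ([], PySem.Set.empty)).1

-- ===== PORT B =====
-- _neighbors(graph, u, directed)
def pvNbrsB (d : PySem.Dict Int (List Int)) (directed : Bool) (u : Int) : List Int :=
  match directed with
  | true => d.getD u []
  | false => (d.get? u).getD []   -- graph[u]: KeyError (= none) excluded by Pre_; [] is junk outside Pre_

-- the `for w in candidates` filter loop: keep each unvisited candidate, marking it visited at once
def pvMarkNew (v : PySem.Set Int) : List Int → List Int × PySem.Set Int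
  | [] => ([], v)
  | w :: t =>
    match PySem.Set.contains v w with
    | true => pvMarkNew v t
    | false =>
      let r := pvMarkNew (PySem.Set.add v w) t
      (w :: r.1, r.2)

theorem pvMarkNew_mu (d : PySem.Dict Int (List Int)) :
    ∀ (L : List Int) (v : PySem.Set Int), (∀ w ∈ L, w ∈ pvUniv d) →
      2 * pvUnvis d (pvMarkNew v L).2 + (pvMarkNew v L).1.length ≤ 2 * pvUnvis d v := by
  intro L
  induction L with
  | nil => intro v _; simp [pvMarkNew]
  | cons w t ih =>
    intro v h
    have ht : ∀ x ∈ t, x ∈ pvUniv d := fun x hx => h x (by simp [hx])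
    cases hc : PySem.Set.contains v w with
    | true => simp only [pvMarkNew, hc]; exact ih v ht
    | false =>
      have hlt := pvUnvis_add_lt d v w (h w (by simp)) hc
      have := ih (PySem.Set.add v w) ht
      simp only [pvMarkNew, hc, List.length_cons]
      omega

-- the `while frontier` loop, one level per recursive call
def pvBfsLevels (d : PySem.Dict Int (List Int)) (directed : Bool)
    (frontier : List Int) (v : PySem.Set Int) : List Int × PySem.Set Int :=
  match frontier with
  | [] => ([], v)
  | a :: t =>
    let cand := (a :: t).flatMap (pvNbrsB d directed)
    let m := pvMarkNew v cand
    let r := pvBfsLevels d directed m.1 m.2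
    ((a :: t) ++ r.1, r.2)
termination_by 2 * pvUnvis d v + frontier.length
decreasing_by
  have hmu := pvMarkNew_mu d ((a :: t).flatMap (pvNbrsB d directed)) v (by
    intro w hw
    obtain ⟨u, _, hwu⟩ := List.mem_flatMap.mp hw
    have : w ∈ (if directed then d.getD u [] else (d.get? u).getD []) := by
      rcases directed with _ | _ <;> simpa [pvNbrsB] using hwu
    exact pvNbrsIf_univ d directed u w this)
  simp only [List.length_cons]
  omega

-- _bfs_component(graph, start, visited, directed)
def pvBfsComponentB (d : PySem.Dict Int (List Int)) (directed : Bool)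
    (start : Int) (v : PySem.Set Int) : List Int × PySem.Set Int :=
  pvBfsLevels d directed [start] (PySem.Set.add v start)

-- the outer list comprehension over the dict's keys, threading the shared visited set
def pvComponentsB (d : PySem.Dict Int (List Int)) (directed : Bool) :
    List Int → PySem.Set Int → List (List Int)
  | [], _ => []
  | k :: ks, v =>
    match PySem.Set.contains v k with
    | true => pvComponentsB d directed ks v
    | false =>
      let r := pvBfsComponentB d directed k v
      r.1 :: pvComponentsB d directed ks r.2

def bfs_for_all_components_alt (graph : List (Int × List Int)) (directed : Bool) : List (List Int) :=
  let d := PySem.Dict.ofList graph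
  pvComponentsB d directed d.keys PySem.Set.empty

-- ===== PRECONDITION & SPEC =====
-- Pre_ excludes exactly the inputs on which Python A raises: with directed falsy, `graph[neighbor]`
-- raises KeyError as soon as a listed neighbor is not a key of the dict (every key is dequeued
-- eventually, so every such neighbor is too). Directed mode uses .get and is total. B raises there too.
def Pre_bfs_for_all_components (graph : List (Int × List Int)) (directed : Bool) : Prop :=
  directed = true ∨
    ∀ w ∈ (PySem.Dict.ofList graph).values.flatten, (PySem.Dict.ofList graph).contains w = true
instance (graph : List (Int × List Int)) (directed : Bool) : Decidable (Pre_bfs_for_all_components graph directed) := by unfold Pre_bfs_for_all_components; infer_instance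

def pvWitness_bfs_for_all_components : (List (Int × List Int)) × Bool :=
  ([(0, [1]), (1, [0, 2]), (2, [])], false)

def Spec_bfs_for_all_components (graph : List (Int × List Int)) (directed : Bool) (out : List (List Int)) : Prop := out = bfs_for_all_components_alt graph directed
instance (graph : List (Int × List Int)) (directed : Bool) (out : List (List Int)) : Decidable (Spec_bfs_for_all_components graph directed out) := by unfold Spec_bfs_for_all_components; infer_instance

-- ===== CLAIM (what is proved, stated in full; the proofs are below) =====
def Claim_equal_bfs_for_all_components : Prop := ∀ (graph : List (Int × List Int)) (directed : Bool), Dom_bfs_for_all_components graph directed → Pre_bfs_for_all_components graph directed → Spec_bfs_for_all_components graph directed (bfs_for_all_components graph directed)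

-- ===== LEMMAS AND PROOFS =====

-- B's neighbor lookup is A's
theorem pvNbrsB_eq (d : PySem.Dict Int (List Int)) (directed : Bool) (u : Int) :
    pvNbrsB d directed u = if directed then d.getD u [] else (d.get? u).getD [] := by
  rcases directed with _ | _ <;> rfl

-- A's enqueue fold = append B's marked-new list, same visited
theorem pvEnq_eq_mark (L : List Int) :
    ∀ (q : List Int) (v : PySem.Set Int),
      L.foldl (fun a w => if PySem.Set.contains a.2 w then a
          else (a.1 ++ [w], PySem.Set.add a.2 w)) (q, v)
        = (q ++ (pvMarkNew v L).1, (pvMarkNew v L).2) := by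
  induction L with
  | nil => intro q v; simp [pvMarkNew]
  | cons w t ih =>
    intro q v
    cases hc : PySem.Set.contains v w with
    | true => simp only [List.foldl_cons, hc, if_true, pvMarkNew]; exact ih q v
    | false =>
      simp only [List.foldl_cons, hc, Bool.false_eq_true, if_false, pvMarkNew]
      rw [ih (q ++ [w]) (PySem.Set.add v w)]
      simp

-- the (next-frontier, visited) state after processing every node of `front` (A's per-level effect)
def pvCollect (d : PySem.Dict Int (List Int)) (directed : Bool)
    (front : List Int) (nx : List Int) (v : PySem.Set Int) : List Int × PySem.Set Int :=
  front.foldl (fun p u =>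
    (if directed then d.getD u [] else (d.get? u).getD []).foldl
      (fun a w => if PySem.Set.contains a.2 w then a
        else (a.1 ++ [w], PySem.Set.add a.2 w)) p) (nx, v)

-- the enqueue fold only appends: a queue prefix passes through unchanged
theorem pvPush_split (nbrs : List Int) (p : List Int) :
    ∀ (q : List Int) (v : PySem.Set Int),
      nbrs.foldl (fun a w => if PySem.Set.contains a.2 w then a
          else (a.1 ++ [w], PySem.Set.add a.2 w)) (p ++ q, v)
        = (p ++ (nbrs.foldl (fun a w => if PySem.Set.contains a.2 w then a
          else (a.1 ++ [w], PySem.Set.add a.2 w)) (q, v)).1,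
          (nbrs.foldl (fun a w => if PySem.Set.contains a.2 w then a
          else (a.1 ++ [w], PySem.Set.add a.2 w)) (q, v)).2) := by
  induction nbrs with
  | nil => intro q v; simp
  | cons w t ih =>
    intro q v
    simp only [List.foldl_cons]
    by_cases hc : PySem.Set.contains v w
    · simp only [hc, if_true]
      exact ih q v
    · simp only [hc, List.append_assoc]
      exact ih (q ++ [w]) (PySem.Set.add v w)

theorem pvCollect_cons (d : PySem.Dict Int (List Int)) (directed : Bool)
    (u : Int) (t nx : List Int) (v : PySem.Set Int) :
    pvCollect d directed (u :: t) nx v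
      = pvCollect d directed t
          ((if directed then d.getD u [] else (d.get? u).getD []).foldl
            (fun a w => if PySem.Set.contains a.2 w then a
              else (a.1 ++ [w], PySem.Set.add a.2 w)) (nx, v)).1
          ((if directed then d.getD u [] else (d.get? u).getD []).foldl
            (fun a w => if PySem.Set.contains a.2 w then a
              else (a.1 ++ [w], PySem.Set.add a.2 w)) (nx, v)).2 := by
  simp [pvCollect]

-- processing the queue `front ++ acc` emits `front`, then continues from the collected state
theorem pvBfsA_level (d : PySem.Dict Int (List Int)) (directed : Bool) :
    ∀ (front acc : List Int) (v : PySem.Set Int),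
      pvBfsA d directed (front ++ acc) v
        = (front ++ (pvBfsA d directed (pvCollect d directed front acc v).1
              (pvCollect d directed front acc v).2).1,
           (pvBfsA d directed (pvCollect d directed front acc v).1
              (pvCollect d directed front acc v).2).2) := by
  intro front
  induction front with
  | nil => intro acc v; simp [pvCollect]
  | cons n t ih =>
    intro acc v
    rw [List.cons_append, pvBfsA.eq_def]
    simp only
    rw [pvPush_split _ t acc v, pvCollect_cons]
    rw [ih]
    simp

-- A's per-level collected state = B's marked-new state over the flattened candidates
theorem pvCollect_eq_mark (d : PySem.Dict Int (List Int)) (directed : Bool) :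
    ∀ (front : List Int) (nx : List Int) (v : PySem.Set Int),
      pvCollect d directed front nx v
        = (nx ++ (pvMarkNew v (front.flatMap (pvNbrsB d directed))).1,
           (pvMarkNew v (front.flatMap (pvNbrsB d directed))).2) := by
  have key : ∀ (front : List Int) (nx : List Int) (v : PySem.Set Int),
      pvCollect d directed front nx v
        = (front.flatMap (pvNbrsB d directed)).foldl
            (fun a w => if PySem.Set.contains a.2 w then a
              else (a.1 ++ [w], PySem.Set.add a.2 w)) (nx, v) := by
    intro front
    induction front with
    | nil => intro nx v; simp [pvCollect]
    | cons u t ih =>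
      intro nx v
      rw [pvCollect_cons, ih, List.flatMap_cons, List.foldl_append, pvNbrsB_eq]
  intro front nx v
  rw [key, pvEnq_eq_mark]

-- B's level loop computes exactly A's queue loop
theorem pvLevels_eq_A (d : PySem.Dict Int (List Int)) (directed : Bool) :
    ∀ (n : Nat) (fr : List Int) (v : PySem.Set Int),
      2 * pvUnvis d v + fr.length ≤ n →
      pvBfsLevels d directed fr v = pvBfsA d directed fr v := by
  intro n
  induction n with
  | zero =>
    intro fr v h
    have : fr = [] := by cases fr with | nil => rfl | cons a t => simp at h
    subst this
    rw [pvBfsLevels.eq_def, pvBfsA.eq_def]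
  | succ n ih =>
    intro fr v h
    cases hfr : fr with
    | nil => rw [pvBfsLevels.eq_def, pvBfsA.eq_def]
    | cons a t =>
      rw [pvBfsLevels.eq_def]
      simp only
      rw [hfr] at h
      have hmu := pvMarkNew_mu d ((a :: t).flatMap (pvNbrsB d directed)) v (by
        intro w hw
        obtain ⟨u, _, hwu⟩ := List.mem_flatMap.mp hw
        have : w ∈ (if directed then d.getD u [] else (d.get? u).getD []) := by
          rcases directed with _ | _ <;> simpa [pvNbrsB] using hwu
        exact pvNbrsIf_univ d directed u w this)
      simp only [List.length_cons] at h
      rw [ih _ _ (by omega)]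
      conv_rhs => rw [show a :: t = (a :: t) ++ [] by simp]
      rw [pvBfsA_level]
      rw [pvCollect_eq_mark]
      simp

-- outer loops: A's foldl over keys = B's recursion over keys
theorem pvOuter_eq (d : PySem.Dict Int (List Int)) (directed : Bool) :
    ∀ (ks : List Int) (acc : List (List Int)) (v : PySem.Set Int),
      (ks.foldl (fun (a : List (List Int) × PySem.Set Int) node =>
          if PySem.Set.contains a.2 node then a
          else
            let r := pvBfsA d directed [node] (PySem.Set.add a.2 node)
            (a.1 ++ [r.1], r.2)) (acc, v)).1
        = acc ++ pvComponentsB d directed ks v := by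
  intro ks
  induction ks with
  | nil => intro acc v; simp [pvComponentsB]
  | cons k t ih =>
    intro acc v
    simp only [List.foldl_cons]
    cases hc : PySem.Set.contains v k with
    | true =>
      simp only [hc, if_true, pvComponentsB]
      exact ih acc v
    | false =>
      simp only [hc, Bool.false_eq_true, if_false, pvComponentsB]
      rw [ih]
      rw [pvBfsComponentB,
        pvLevels_eq_A d directed (2 * pvUnvis d (PySem.Set.add v k) + 1) [k]
          (PySem.Set.add v k) (by simp)]
      simp

-- ===== VERDICT (by name: the statement is the Claim_ definition above) =====
theorem bfs_for_all_components_spec : Claim_equal_bfs_for_all_components := by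
  intro graph directed _ _
  unfold Spec_bfs_for_all_components bfs_for_all_components bfs_for_all_components_alt
  simp only
  rw [pvOuter_eq]
  simp
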